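-- pv_equiv track=rewrite | github.com/marcus-aurelianus/codeforce | round637/brokenscreen.py | findnearestbiggestNum
-- ===== SOURCE A (Python) =====
-- dic={"1110111":0,"0010010":1, "1011101":2, "1011011":3, "0111010":4, "1101011":5, "1101111":6, "1010010":7, "1111111":8, "1111011":9}
--
-- def findnearestbiggestNum(inputnum):
--     needk=8
--     bestnum=-1
--     bestform=None
--     for k,v in dic.items():
--         counter=0
--         tans=True
--         for i in range(7):
--             inputi=inputnum[i]
--             respecti=k[i]
--             if inputi=='1' :
--                 if respecti=='0':
--                     tans=False
--                     break
--                 else: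
--                     continue
--             else:
--                 if respecti=='1':
--                     counter+=1
--                 else:
--                     continue
--         if tans:
--             if counter<needk:
--                 needk=counter
--                 bestnum=v
--                 bestform=k
--             elif counter==needk:
--                 if v>bestnum:
--                     bestnum=v
--                     bestform=k
--     if bestnum>=0:
--         return bestform,bestnum,needk
--     else:
--         return None
-- ===== SOURCE B (Python) =====
-- dic={"1110111":0,"0010010":1, "1011101":2, "1011011":3, "0111010":4, "1101011":5, "1101111":6, "1010010":7, "1111111":8, "1111011":9}
--
-- PAT = {v: k for k, v in dic.items()}
--
-- def _mask(s):
--     return sum(1 << i for i in range(7) if s[i] == '1')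
--
-- def _popcount(x):
--     c = 0
--     while x:
--         c += x & 1
--         x >>= 1
--     return c
--
-- def findnearestbiggestNum(inputnum):
--     # staged first-hit search: try costs 0..7 in increasing order, digits 9..0,
--     # return the first pattern that covers the input with exactly that cost
--     m = _mask(inputnum)
--     for cost in range(8):
--         for v in range(9, -1, -1):
--             k = PAT[v]
--             p = _mask(k)
--             if p | m == p and _popcount(p) - _popcount(m) == cost:
--                 return k, v, cost
--     return None
-- ===== Notes on version B (the rewrite author's own statement) =====
-- stated objective: alternative
-- what changed: Replaced A's one-pass running-best scan over the table (per-candidate char loop with early break, needk/bestnum/bestform state) by a staged first-hit search: encode the display and each pattern as 7-bit integer masks, then iterate cost 0..7 in increasing order and digit 9..0, returning the first pattern whose mask covers the input with exactly that many extra segments (popcount difference), so no best-so-far state exists.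
import Mathlib
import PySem

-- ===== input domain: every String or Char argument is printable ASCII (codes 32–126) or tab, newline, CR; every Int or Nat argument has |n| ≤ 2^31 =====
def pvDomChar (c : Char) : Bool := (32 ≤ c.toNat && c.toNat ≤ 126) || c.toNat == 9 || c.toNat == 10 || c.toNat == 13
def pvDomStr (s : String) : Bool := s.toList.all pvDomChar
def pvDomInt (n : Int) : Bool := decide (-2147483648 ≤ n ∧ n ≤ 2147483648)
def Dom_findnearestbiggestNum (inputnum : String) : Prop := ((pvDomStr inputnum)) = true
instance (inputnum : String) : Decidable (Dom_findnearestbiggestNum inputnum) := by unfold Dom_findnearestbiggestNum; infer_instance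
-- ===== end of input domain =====

-- B replaces A's running-best scan by a staged first-hit search over (cost 0..7, digit 9..0)
-- on integer bit masks; same value by construction of the search order (objective: alternative).

-- ===== PORT A =====
def pvDic : List (String × Int) :=
  [("1110111", 0), ("0010010", 1), ("1011101", 2), ("1011011", 3), ("0111010", 4),
   ("1101011", 5), ("1101111", 6), ("1010010", 7), ("1111111", 8), ("1111011", 9)]

-- inner 'for i in range(7)' loop of A, with 'break' as an early return; pyGetD is exact under Pre_ (index in range)
def pvAInner (cs ks : List Char) : List Int → Int → Int × Bool
  | [], counter => (counter, true)
  | i :: rest, counter =>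
    let inputi := PySem.List.pyGetD cs i ' '
    let respecti := PySem.List.pyGetD ks i ' '
    if inputi = '1' then
      if respecti = '0' then (counter, false)
      else pvAInner cs ks rest counter
    else
      if respecti = '1' then pvAInner cs ks rest (counter + 1)
      else pvAInner cs ks rest counter

-- one iteration of A's 'for k,v in dic.items()' loop; state = (needk, bestnum, bestform)
def pvAStep (cs : List Char) (st : Int × Int × Option String) (kv : String × Int) :
    Int × Int × Option String :=
  let r := pvAInner cs kv.1.toList (PySem.List.pyRange 0 7 1) 0
  if r.2 then
    if r.1 < st.1 then (r.1, kv.2, some kv.1)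
    else if r.1 = st.1 then
      if kv.2 > st.2.1 then (st.1, kv.2, some kv.1) else st
    else st
  else st

def pvAList (cs : List Char) : Option (String × Int × Int) :=
  let st := pvDic.foldl (pvAStep cs) (8, -1, none)
  if st.2.1 ≥ 0 then
    match st.2.2 with
    | some f => some (f, st.2.1, st.1)
    | none => none
  else none

def findnearestbiggestNum (inputnum : String) : Option (String × Int × Int) :=
  pvAList inputnum.toList

-- ===== PORT B =====
-- PAT = {v: k for k, v in dic.items()}
def pvPat : PySem.Dict Int String := PySem.Dict.ofList (pvDic.map (fun kv => (kv.2, kv.1)))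

-- _mask: sum(1 << i for i in range(7) if s[i] == '1')
def pvMask (cs : List Char) : Nat :=
  ((PySem.List.pyRange 0 7 1).filter (fun i => PySem.List.pyGetD cs i ' ' = '1')).foldl
    (fun a i => a + (1 <<< i.toNat)) 0

-- _popcount: while x: c += x & 1; x >>= 1  (x is a nonnegative mask; fuel = x bounds the loop)
def pvPopcountAux : Nat → Nat → Nat
  | 0, _ => 0
  | fuel + 1, x => if x = 0 then 0 else (x &&& 1) + pvPopcountAux fuel (x >>> 1)

def pvPopcount (x : Nat) : Nat := pvPopcountAux x x

-- inner 'for v in range(9,-1,-1)' loop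
def pvFindDigit (m : Nat) (cost : Int) : List Int → Option (String × Int × Int)
  | [] => none
  | v :: rest =>
    let k := (PySem.Dict.get? pvPat v).getD ""
    let p := pvMask k.toList
    if p ||| m = p ∧ ((pvPopcount p : Int) - (pvPopcount m : Int) = cost) then
      some (k, v, cost)
    else pvFindDigit m cost rest

-- outer 'for cost in range(8)' loop, first hit wins
def pvBSearch (m : Nat) : List Int → Option (String × Int × Int)
  | [] => none
  | cost :: rest =>
    match pvFindDigit m cost (PySem.List.pyRange 9 (-1) (-1)) with
    | some r => some r
    | none => pvBSearch m rest

def pvBList (cs : List Char) : Option (String × Int × Int) :=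
  pvBSearch (pvMask cs) (PySem.List.pyRange 0 8 1)

def findnearestbiggestNum_alt (inputnum : String) : Option (String × Int × Int) :=
  pvBList inputnum.toList

-- ===== PRECONDITION & SPEC =====
-- A indexes inputnum[i] for i in range(7): it raises IndexError on strings shorter than 7.
def Pre_findnearestbiggestNum (inputnum : String) : Prop := 7 ≤ inputnum.toList.length
instance (inputnum : String) : Decidable (Pre_findnearestbiggestNum inputnum) := by
  unfold Pre_findnearestbiggestNum; infer_instance

def pvWitness_findnearestbiggestNum : String := "0010010"

def Spec_findnearestbiggestNum (inputnum : String) (out : Option (String × Int × Int)) : Prop :=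
  out = findnearestbiggestNum_alt inputnum
instance (inputnum : String) (out : Option (String × Int × Int)) :
    Decidable (Spec_findnearestbiggestNum inputnum out) := by
  unfold Spec_findnearestbiggestNum; infer_instance

-- ===== CLAIM (what is proved, stated in full; the proofs are below) =====
def Claim_equal_findnearestbiggestNum : Prop := ∀ (inputnum : String),
  Dom_findnearestbiggestNum inputnum → Pre_findnearestbiggestNum inputnum →
  Spec_findnearestbiggestNum inputnum (findnearestbiggestNum inputnum)

-- ===== LEMMAS AND PROOFS =====

-- A's inner loop only looks at cs through the tests cs[i] == '1'
theorem pvAInner_congr (cs ds ks : List Char) (idxs : List Int) (c : Int)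
    (h : ∀ i ∈ idxs, (PySem.List.pyGetD cs i ' ' = '1') ↔ (PySem.List.pyGetD ds i ' ' = '1')) :
    pvAInner cs ks idxs c = pvAInner ds ks idxs c := by
  induction idxs generalizing c with
  | nil => rfl
  | cons i rest ih =>
    have hi := h i (by simp)
    have hr : ∀ j ∈ rest, (PySem.List.pyGetD cs j ' ' = '1') ↔ (PySem.List.pyGetD ds j ' ' = '1') :=
      fun j hj => h j (List.mem_cons_of_mem _ hj)
    by_cases hc : PySem.List.pyGetD cs i ' ' = '1'
    · have hd : PySem.List.pyGetD ds i ' ' = '1' := hi.mp hc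
      simp only [pvAInner, if_pos hc, if_pos hd]
      split
      · rfl
      · exact ih _ hr
    · have hd : ¬ PySem.List.pyGetD ds i ' ' = '1' := fun h' => hc (hi.mpr h')
      simp only [pvAInner, if_neg hc, if_neg hd]
      split
      · exact ih _ hr
      · exact ih _ hr

theorem pvAList_congr (cs ds : List Char)
    (h : ∀ i ∈ PySem.List.pyRange 0 7 1,
      (PySem.List.pyGetD cs i ' ' = '1') ↔ (PySem.List.pyGetD ds i ' ' = '1')) :
    pvAList cs = pvAList ds := by
  have hstep : pvAStep cs = pvAStep ds := by
    funext st kv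
    simp only [pvAStep, pvAInner_congr cs ds kv.1.toList _ 0 h]
  simp only [pvAList, hstep]

-- B only looks at cs through pvMask, which only looks at the same tests
theorem pvMask_congr (cs ds : List Char)
    (h : ∀ i ∈ PySem.List.pyRange 0 7 1,
      (PySem.List.pyGetD cs i ' ' = '1') ↔ (PySem.List.pyGetD ds i ' ' = '1')) :
    pvMask cs = pvMask ds := by
  unfold pvMask
  congr 1
  apply List.filter_congr
  intro i hi
  simpa using h i hi

theorem pvBList_congr (cs ds : List Char)
    (h : ∀ i ∈ PySem.List.pyRange 0 7 1,
      (PySem.List.pyGetD cs i ' ' = '1') ↔ (PySem.List.pyGetD ds i ' ' = '1')) :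
    pvBList cs = pvBList ds := by
  simp only [pvBList, pvMask_congr cs ds h]

-- the decisive finite check: on every 7-bit pattern the two pipelines agree
theorem pvKey : ∀ b0 b1 b2 b3 b4 b5 b6 : Bool,
    pvAList [cond b0 '1' '0', cond b1 '1' '0', cond b2 '1' '0', cond b3 '1' '0',
             cond b4 '1' '0', cond b5 '1' '0', cond b6 '1' '0'] =
    pvBList [cond b0 '1' '0', cond b1 '1' '0', cond b2 '1' '0', cond b3 '1' '0',
             cond b4 '1' '0', cond b5 '1' '0', cond b6 '1' '0'] := by
  decide

-- the main lemma on char lists: both pipelines agree on any list of length ≥ 7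
theorem pvMain (cs : List Char) (h : 7 ≤ cs.length) : pvAList cs = pvBList cs := by
  rcases cs with _ | ⟨c0, _ | ⟨c1, _ | ⟨c2, _ | ⟨c3, _ | ⟨c4, _ | ⟨c5, _ | ⟨c6, rest⟩⟩⟩⟩⟩⟩⟩ <;>
    simp only [List.length_cons, List.length_nil] at h <;> try omega
  have hiff : ∀ i ∈ PySem.List.pyRange 0 7 1,
      (PySem.List.pyGetD (c0 :: c1 :: c2 :: c3 :: c4 :: c5 :: c6 :: rest) i ' ' = '1') ↔
      (PySem.List.pyGetD [cond (decide (c0 = '1')) '1' '0', cond (decide (c1 = '1')) '1' '0',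
        cond (decide (c2 = '1')) '1' '0', cond (decide (c3 = '1')) '1' '0',
        cond (decide (c4 = '1')) '1' '0', cond (decide (c5 = '1')) '1' '0',
        cond (decide (c6 = '1')) '1' '0'] i ' ' = '1') := by
    have hr : PySem.List.pyRange 0 7 1 = [0, 1, 2, 3, 4, 5, 6] := by decide
    rw [hr]
    intro i hi
    fin_cases hi <;>
      simp only [PySem.List.pyGetD_ofNat', List.getD, List.getElem?_cons_zero,
        List.getElem?_cons_succ, Option.getD_some, Bool.cond_decide] <;>
      · constructor
        · intro h1; simp [h1]
        · intro h1; by_contra h2; simp [h2] at h1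
  rw [pvAList_congr _ _ hiff, pvBList_congr _ _ hiff]
  exact pvKey (decide (c0 = '1')) (decide (c1 = '1')) (decide (c2 = '1')) (decide (c3 = '1'))
    (decide (c4 = '1')) (decide (c5 = '1')) (decide (c6 = '1'))

-- ===== VERDICT (by name: the statement is the Claim_ definition above) =====
theorem findnearestbiggestNum_spec : Claim_equal_findnearestbiggestNum := by
  intro s _hdom hpre
  unfold Spec_findnearestbiggestNum findnearestbiggestNum findnearestbiggestNum_alt
  exact pvMain s.toList hpre
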